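-- pv_equiv track=rewrite | github.com/ParzivalEugene/School-Informatics | trials/foxford_16.05.2023/15.py | check
-- ===== SOURCE A (Python) =====
-- def check(A: int) -> bool:
--     for x in range(1, 100):
--         for y in range(1, 100):
--             if (x + y < 54) or (x <= y - 3) or (x > A):
--                 continue
--             else:
--                 return False
--     return True
-- ===== SOURCE B (Python) =====
-- def check(A: int) -> bool:
--     # The loop returns False iff some x,y in 1..99 satisfy x+y>=54, x>y-3, x<=A;
--     # the smallest such x is 26 (e.g. y=28), so:
--     return A < 26
-- ===== Notes on version B (the rewrite author's own statement) =====
-- stated objective: simpler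
-- what changed: Replaced the 99x99 nested search loop with the closed-form threshold predicate derived from it: a blocking pair exists iff A >= 26, so B just returns A < 26.
import Mathlib
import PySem

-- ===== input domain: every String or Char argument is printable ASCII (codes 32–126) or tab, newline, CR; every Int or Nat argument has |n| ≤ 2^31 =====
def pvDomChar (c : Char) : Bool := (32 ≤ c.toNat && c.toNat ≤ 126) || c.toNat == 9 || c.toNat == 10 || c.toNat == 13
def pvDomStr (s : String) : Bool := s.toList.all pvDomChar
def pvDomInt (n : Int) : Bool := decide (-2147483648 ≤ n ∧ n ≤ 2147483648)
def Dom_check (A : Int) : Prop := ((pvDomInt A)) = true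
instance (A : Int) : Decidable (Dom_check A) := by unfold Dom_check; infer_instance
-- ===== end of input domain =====

-- B replaces A's 99×99 nested search loop with the closed-form predicate A < 26 (simpler).

-- ===== PORT A =====
-- the nested for-loop with an early 'return False' is the statement that every (x, y)
-- pair passes the 'continue' guard, in the same traversal order
def check (A : Int) : Bool :=
  (PySem.List.pyRange 1 100 1).all (fun x =>
    (PySem.List.pyRange 1 100 1).all (fun y =>
      decide (x + y < 54) || decide (x ≤ y - 3) || decide (x > A)))

-- ===== PORT B =====
def check_alt (A : Int) : Bool := decide (A < 26)

-- ===== PRECONDITION & SPEC =====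
def Spec_check (A : Int) (out : Bool) : Prop := out = check_alt A
instance (A : Int) (out : Bool) : Decidable (Spec_check A out) := by unfold Spec_check; infer_instance

-- ===== CLAIM (what is proved, stated in full; the proofs are below) =====
def Claim_equal_check : Prop := ∀ (A : Int), Dom_check A → Spec_check A (check A)

-- ===== LEMMAS AND PROOFS =====

lemma check_true_of_lt (A : Int) (h : A < 26) : check A = true := by
  unfold check
  rw [List.all_eq_true]
  intro x hx
  rw [List.all_eq_true]
  intro y hy
  rw [PySem.List.mem_pyRange_one] at hx hy
  simp only [Bool.or_eq_true, decide_eq_true_eq]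
  omega

lemma check_false_of_ge (A : Int) (h : 26 ≤ A) : check A = false := by
  unfold check
  rw [List.all_eq_false]
  refine ⟨26, ?_, ?_⟩
  · rw [PySem.List.mem_pyRange_one]; omega
  · rw [Bool.not_eq_true, List.all_eq_false]
    refine ⟨28, ?_, ?_⟩
    · rw [PySem.List.mem_pyRange_one]; omega
    · simp only [Bool.not_eq_true, Bool.or_eq_false_iff, decide_eq_false_iff_not]
      omega

-- ===== VERDICT (by name: the statement is the Claim_ definition above) =====
theorem check_spec : Claim_equal_check := by
  intro A _
  unfold Spec_check check_alt
  by_cases h : A < 26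
  · rw [check_true_of_lt A h]; simp [h]
  · rw [check_false_of_ge A (by omega)]
    simp [h]
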